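-- pv_equiv track=rewrite | github.com/liurunzhan/verification | src/verilog.py | match_verilog_name_rule
-- ===== SOURCE A (Python) =====
-- name_rule = {"_", ".", "[", "]"}
--
-- def match_verilog_name_rule(name, start):
--   matched = True
--   if not name[start].isalpha() and name[start] != "_":
--     if name[start].isdigit():
--       matched = False
--     elif name[start] != "`":
--       return False, 1
--   length = 1
--   bracket_flag = False
--   for i in range(start+1, len(name)):
--     if name[i].isalnum() or name[i] in name_rule or bracket_flag:
--       length += 1
--       if name[i] == "[":
--         bracket_flag = True
--       elif name[i] == "]":
--         bracket_flag = False
--     else: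
--       break
--   return matched, length
-- ===== SOURCE B (Python) =====
-- name_rule = {"_", ".", "[", "]"}
--
-- def match_verilog_name_rule(name, start):
--     c = name[start]
--     if c.isalpha() or c == "_":
--         matched = True
--     elif c.isdigit():
--         matched = False
--     elif c == "`":
--         matched = True
--     else:
--         return False, 1
--     # staged passes over the tail characters instead of one stateful scan:
--     chars = [name[i] for i in range(start + 1, len(name))]
--     # pass 1: bracket-state *before* each position, as an array
--     flags = []
--     f = False
--     for ch in chars:
--         flags.append(f)
--         f = (ch == "[") or (f and ch != "]")
--     # pass 2: first position that is rejected given its precomputed state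
--     stop = len(chars)
--     for j, ch in enumerate(chars):
--         if not (ch.isalnum() or ch in name_rule or flags[j]):
--             stop = j
--             break
--     return matched, 1 + stop
-- ===== Notes on version B (the rewrite author's own statement) =====
-- stated objective: alternative
-- what changed: Replaced A's single stateful scan (length counter plus bracket_flag mutated in one loop with break) by staged passes: materialize the tail characters, precompute the bracket-state array in one pass, then a second pass finds the first rejected position against that array; the length is a closed form 1 + stop.
import Mathlib
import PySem

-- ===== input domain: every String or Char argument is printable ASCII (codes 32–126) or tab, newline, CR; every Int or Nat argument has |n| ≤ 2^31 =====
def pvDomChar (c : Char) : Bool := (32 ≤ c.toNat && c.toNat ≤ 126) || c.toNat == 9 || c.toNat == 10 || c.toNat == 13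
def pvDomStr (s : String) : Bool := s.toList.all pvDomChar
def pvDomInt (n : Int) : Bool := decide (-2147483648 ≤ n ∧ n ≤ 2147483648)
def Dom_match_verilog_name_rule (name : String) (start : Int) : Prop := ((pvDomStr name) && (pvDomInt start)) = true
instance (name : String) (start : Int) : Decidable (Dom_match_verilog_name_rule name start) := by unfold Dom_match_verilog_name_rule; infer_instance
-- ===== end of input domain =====

-- B replaces A's single stateful scan with staged passes: precompute the bracket-state array, then find the first rejected position ('alternative', same cost).

-- ===== PORT A =====

-- name_rule = {"_", ".", "[", "]"}
def pvNameRule : PySem.Set Char := PySem.Set.ofList ['_', '.', '[', ']']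

-- A's for-loop over range(start+1, len(name)) with break, state (length, bracket_flag)
def pvLoopA (cs : List Char) (idxs : List Int) (length : Int) (bflag : Bool) : Int :=
  match idxs with
  | [] => length
  | i :: rest =>
    let c := PySem.List.pyGetD cs i ' '
    if PySem.Chars.isalnum c || PySem.Set.contains pvNameRule c || bflag then
      if c = '[' then pvLoopA cs rest (length + 1) true
      else if c = ']' then pvLoopA cs rest (length + 1) false
      else pvLoopA cs rest (length + 1) bflag
    else length

def match_verilog_name_rule (name : String) (start : Int) : Bool × Int :=
  let cs := name.toList
  let c0 := PySem.List.pyGetD cs start ' '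
  -- the head of A: 'matched' flag, with the early 'return False, 1' as none
  let m? : Option Bool :=
    if !(PySem.Chars.isalpha c0) && !(c0 == '_') then
      if PySem.Chars.isdigit c0 then some false
      else if !(c0 == '`') then none
      else some true
    else some true
  match m? with
  | none => (false, 1)
  | some matched =>
      (matched, pvLoopA cs (PySem.List.pyRange (start + 1) (PySem.List.len cs) 1) 1 false)

-- ===== PORT B =====

-- pass 1 of Source B: the bracket-state *before* each position, as a list
def pvFlagsB : List Char → Bool → List Bool
  | [], _ => []
  | ch :: rest, f => f :: pvFlagsB rest ((ch == '[') || (f && !(ch == ']')))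

-- pass 2 of Source B: first position rejected given its precomputed state (default: len chars)
def pvStopB : List (Char × Bool) → Int → Int → Int
  | [], _, dflt => dflt
  | (ch, f) :: rest, j, dflt =>
    if !(PySem.Chars.isalnum ch || PySem.Set.contains pvNameRule ch || f) then j
    else pvStopB rest (j + 1) dflt

def match_verilog_name_rule_alt (name : String) (start : Int) : Bool × Int :=
  let cs := name.toList
  let c := PySem.List.pyGetD cs start ' '
  let m? : Option Bool :=
    if PySem.Chars.isalpha c || c == '_' then some true
    else if PySem.Chars.isdigit c then some false
    else if c == '`' then some true
    else none
  match m? with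
  | none => (false, 1)
  | some matched =>
    let chars := (PySem.List.pyRange (start + 1) (PySem.List.len cs) 1).map
                   (fun i => PySem.List.pyGetD cs i ' ')
    let flags := pvFlagsB chars false
    let stop := pvStopB (chars.zip flags) 0 (PySem.List.len chars)
    (matched, 1 + stop)

-- ===== PRECONDITION & SPEC =====
-- A raises IndexError iff name[start] is out of range (Python indexing, negative from the end).
def Pre_match_verilog_name_rule (name : String) (start : Int) : Prop :=
  PySem.Raise.InRange name.toList.length start
instance (name : String) (start : Int) : Decidable (Pre_match_verilog_name_rule name start) := by
  unfold Pre_match_verilog_name_rule; infer_instance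

def pvWitness_match_verilog_name_rule : String × Int := ("a[3]", 0)

def Spec_match_verilog_name_rule (name : String) (start : Int) (out : Bool × Int) : Prop := out = match_verilog_name_rule_alt name start
instance (name : String) (start : Int) (out : Bool × Int) : Decidable (Spec_match_verilog_name_rule name start out) := by unfold Spec_match_verilog_name_rule; infer_instance

-- ===== CLAIM (what is proved, stated in full; the proofs are below) =====
def Claim_equal_match_verilog_name_rule : Prop := ∀ (name : String) (start : Int), Dom_match_verilog_name_rule name start → Pre_match_verilog_name_rule name start → Spec_match_verilog_name_rule name start (match_verilog_name_rule name start)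

-- ===== LEMMAS AND PROOFS =====

-- A's loop viewed over the fetched characters (proof-only bridge)
def pvLoopChars (xs : List Char) (length : Int) (bflag : Bool) : Int :=
  match xs with
  | [] => length
  | c :: rest =>
    if PySem.Chars.isalnum c || PySem.Set.contains pvNameRule c || bflag then
      if c = '[' then pvLoopChars rest (length + 1) true
      else if c = ']' then pvLoopChars rest (length + 1) false
      else pvLoopChars rest (length + 1) bflag
    else length

lemma pvLoopA_eq_chars (cs : List Char) : ∀ (idxs : List Int) (length : Int) (bflag : Bool),
    pvLoopA cs idxs length bflag
      = pvLoopChars (idxs.map (fun i => PySem.List.pyGetD cs i ' ')) length bflag := by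
  intro idxs
  induction idxs with
  | nil => intro length bflag; rfl
  | cons i rest ih =>
    intro length bflag
    simp only [pvLoopA, pvLoopChars, List.map_cons]
    split_ifs <;> simp [ih]

lemma pvFlagUpd (c : Char) (f : Bool) :
    ((c == '[') || (f && !(c == ']')))
      = (if c = '[' then true else if c = ']' then false else f) := by
  by_cases h1 : c = '['
  · simp [h1]
  · by_cases h2 : c = ']'
    · rw [beq_eq_false_iff_ne.mpr h1]
      simp [h2]
    · rw [beq_eq_false_iff_ne.mpr h1, beq_eq_false_iff_ne.mpr h2]
      simp [h1, h2]

lemma pvLoop_cons_acc (c : Char) (rest : List Char) (L : Int) (f : Bool)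
    (h : (PySem.Chars.isalnum c || PySem.Set.contains pvNameRule c || f) = true) :
    pvLoopChars (c :: rest) L f
      = pvLoopChars rest (L + 1) (if c = '[' then true else if c = ']' then false else f) := by
  simp only [pvLoopChars]
  by_cases h1 : c = '[' <;> by_cases h2 : c = ']' <;> simp_all

lemma pvLoop_cons_rej (c : Char) (rest : List Char) (L : Int) (f : Bool)
    (h : (PySem.Chars.isalnum c || PySem.Set.contains pvNameRule c || f) = false) :
    pvLoopChars (c :: rest) L f = L := by
  simp only [pvLoopChars]
  simp_all

lemma pvStop_cons_acc (ch : Char) (f : Bool) (ps : List (Char × Bool)) (j d : Int)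
    (h : (PySem.Chars.isalnum ch || PySem.Set.contains pvNameRule ch || f) = true) :
    pvStopB ((ch, f) :: ps) j d = pvStopB ps (j + 1) d := by
  have hfalse : (!(PySem.Chars.isalnum ch || PySem.Set.contains pvNameRule ch || f)) = false := by
    rw [h]; rfl
  simp only [pvStopB]
  rw [hfalse]
  simp

lemma pvStop_cons_rej (ch : Char) (f : Bool) (ps : List (Char × Bool)) (j d : Int)
    (h : (PySem.Chars.isalnum ch || PySem.Set.contains pvNameRule ch || f) = false) :
    pvStopB ((ch, f) :: ps) j d = j := by
  have htrue : (!(PySem.Chars.isalnum ch || PySem.Set.contains pvNameRule ch || f)) = true := by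
    rw [h]; rfl
  simp only [pvStopB]
  rw [htrue]
  simp

lemma pvStopB_shift : ∀ (pairs : List (Char × Bool)) (j dflt : Int),
    pvStopB pairs (j + 1) (dflt + 1) = 1 + pvStopB pairs j dflt := by
  intro pairs
  induction pairs with
  | nil => intro j dflt; simp [pvStopB]; ring
  | cons p rest ih =>
    intro j dflt
    obtain ⟨ch, f⟩ := p
    by_cases h : (PySem.Chars.isalnum ch || PySem.Set.contains pvNameRule ch || f) = true
    · rw [pvStop_cons_acc ch f rest _ _ h, pvStop_cons_acc ch f rest _ _ h, ih]
    · have h' := Bool.eq_false_iff.mpr h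
      rw [pvStop_cons_rej ch f rest _ _ h', pvStop_cons_rej ch f rest _ _ h']
      ring

-- A's stateful scan equals 'length + first rejected position against the precomputed flags'
lemma pvLoopChars_eq_stop : ∀ (xs : List Char) (length : Int) (f : Bool),
    pvLoopChars xs length f
      = length + pvStopB (xs.zip (pvFlagsB xs f)) 0 (xs.length : Int) := by
  intro xs
  induction xs with
  | nil => intro length f; simp [pvLoopChars, pvFlagsB, pvStopB]
  | cons c rest ih =>
    intro length f
    have hlen : (((c :: rest).length : Nat) : Int) = (rest.length : Int) + 1 := by
      simp
    simp only [pvFlagsB, List.zip_cons_cons]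
    by_cases hacc : (PySem.Chars.isalnum c || PySem.Set.contains pvNameRule c || f) = true
    · rw [pvLoop_cons_acc c rest length f hacc, ih,
        pvStop_cons_acc c f _ _ _ hacc, ← pvFlagUpd c f, hlen]
      have hsh := pvStopB_shift (rest.zip (pvFlagsB rest ((c == '[') || (f && !(c == ']'))))) 0
        (rest.length : Int)
      simp only [zero_add] at hsh ⊢
      rw [hsh]
      ring
    · have h' := Bool.eq_false_iff.mpr hacc
      rw [pvLoop_cons_rej c rest length f h', pvStop_cons_rej c f _ _ _ h']
      ring

-- ===== VERDICT (by name: the statement is the Claim_ definition above) =====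
theorem match_verilog_name_rule_spec : Claim_equal_match_verilog_name_rule := by
  intro name start _ _
  unfold Spec_match_verilog_name_rule match_verilog_name_rule match_verilog_name_rule_alt
  simp only []
  have hm :
      (if !(PySem.Chars.isalpha (PySem.List.pyGetD name.toList start ' ')) &&
           !(PySem.List.pyGetD name.toList start ' ' == '_') then
         if PySem.Chars.isdigit (PySem.List.pyGetD name.toList start ' ') then some false
         else if !(PySem.List.pyGetD name.toList start ' ' == '`') then none
         else some true
       else some true)
      = (if PySem.Chars.isalpha (PySem.List.pyGetD name.toList start ' ') ||
            PySem.List.pyGetD name.toList start ' ' == '_' then some true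
         else if PySem.Chars.isdigit (PySem.List.pyGetD name.toList start ' ') then some false
         else if PySem.List.pyGetD name.toList start ' ' == '`' then some true
         else none) := by
    by_cases h1 : PySem.Chars.isalpha (PySem.List.pyGetD name.toList start ' ') = true <;>
      by_cases h2 : PySem.List.pyGetD name.toList start ' ' = '_' <;>
      by_cases h3 : PySem.Chars.isdigit (PySem.List.pyGetD name.toList start ' ') = true <;>
      by_cases h4 : PySem.List.pyGetD name.toList start ' ' = '`'
    all_goals (simp only [h4] at h1 h2 h3 ⊢; simp [h1, h2, h3])
  rw [hm]
  cases hB : (if PySem.Chars.isalpha (PySem.List.pyGetD name.toList start ' ') ||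
            PySem.List.pyGetD name.toList start ' ' == '_' then some true
         else if PySem.Chars.isdigit (PySem.List.pyGetD name.toList start ' ') then some false
         else if PySem.List.pyGetD name.toList start ' ' == '`' then some true
         else none) with
  | none => rfl
  | some matched =>
    have hloop :
        pvLoopA name.toList (PySem.List.pyRange (start + 1) (PySem.List.len name.toList) 1) 1 false
          = 1 + pvStopB
              (((PySem.List.pyRange (start + 1) (PySem.List.len name.toList) 1).map
                  (fun i => PySem.List.pyGetD name.toList i ' ')).zip
                (pvFlagsB ((PySem.List.pyRange (start + 1) (PySem.List.len name.toList) 1).map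
                  (fun i => PySem.List.pyGetD name.toList i ' ')) false))
              0
              (PySem.List.len ((PySem.List.pyRange (start + 1) (PySem.List.len name.toList) 1).map
                  (fun i => PySem.List.pyGetD name.toList i ' '))) := by
      rw [pvLoopA_eq_chars, pvLoopChars_eq_stop]
      simp only [PySem.List.len_eq]
    exact congrArg (fun L => (matched, L)) hloop
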